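-- pv_equiv track=rewrite | github.com/adobe-type-tools/kernalytics-rf-ext | Kern-A-Lytics.roboFontExt/lib/kerningHelper.py | high_gamut_dict
-- ===== SOURCE A (Python) =====
-- import collections
--
-- def _gamut(value_list):
--     '''
--     Returns the maximum value distance in a list of values
--     '''
--     difference = 0
--     n_list = [i for i in value_list if i]
--     if any(n_list):
--         difference = (max(n_list) - min(n_list))
--
--     return difference
--
-- def high_gamut_dict(cmb_kerning, approx_amount=100):
--     '''
--     Pairs with the highest kerning gamut
--     '''
--     output = collections.OrderedDict({})
--     gamut_dict = {}
--     for pair, values in cmb_kerning.items():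
--         gamut = _gamut(values)
--         gamut_dict.setdefault(gamut, []).append(pair)
--     max_gamut_list = sorted(gamut_dict.keys(), reverse=True)
--     pair_count = 0
--     for gamut_value in max_gamut_list:
--         pairs = gamut_dict.get(gamut_value)
--         if pair_count < approx_amount:
--             for pair in pairs:
--                 output[pair] = cmb_kerning.get(pair)
--         pair_count += len(pairs)
--     return output
-- ===== SOURCE B (Python) =====
-- import collections
--
-- def _gamut(value_list):
--     '''
--     Returns the maximum value distance in a list of values
--     '''
--     difference = 0
--     n_list = [i for i in value_list if i]
--     if any(n_list):
--         difference = (max(n_list) - min(n_list))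
--
--     return difference
--
-- def high_gamut_dict(cmb_kerning, approx_amount=100):
--     '''
--     Pairs with the highest kerning gamut
--     '''
--     entries = [(pair, values, _gamut(values)) for pair, values in cmb_kerning.items()]
--     gamut_levels = sorted({g for _, _, g in entries}, reverse=True)
--     output = collections.OrderedDict()
--     for level in gamut_levels:
--         # emit this gamut level iff fewer than approx_amount pairs have a higher gamut
--         if sum(1 for _, _, g in entries if g > level) < approx_amount:
--             for pair, values, g in entries:
--                 if g == level:
--                     output[pair] = values
--     return output
-- ===== Notes on version B (the rewrite author's own statement) =====
-- stated objective: alternative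
-- what changed: B drops A's gamut->pairs bucket dict and running pair counter: it computes each entry's gamut once, walks the distinct gamut levels in descending order, and emits a level's pairs (by rescanning the entry list) iff the number of pairs with strictly higher gamut is below approx_amount, reading values directly instead of re-looking them up in the dict.
import Mathlib
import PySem

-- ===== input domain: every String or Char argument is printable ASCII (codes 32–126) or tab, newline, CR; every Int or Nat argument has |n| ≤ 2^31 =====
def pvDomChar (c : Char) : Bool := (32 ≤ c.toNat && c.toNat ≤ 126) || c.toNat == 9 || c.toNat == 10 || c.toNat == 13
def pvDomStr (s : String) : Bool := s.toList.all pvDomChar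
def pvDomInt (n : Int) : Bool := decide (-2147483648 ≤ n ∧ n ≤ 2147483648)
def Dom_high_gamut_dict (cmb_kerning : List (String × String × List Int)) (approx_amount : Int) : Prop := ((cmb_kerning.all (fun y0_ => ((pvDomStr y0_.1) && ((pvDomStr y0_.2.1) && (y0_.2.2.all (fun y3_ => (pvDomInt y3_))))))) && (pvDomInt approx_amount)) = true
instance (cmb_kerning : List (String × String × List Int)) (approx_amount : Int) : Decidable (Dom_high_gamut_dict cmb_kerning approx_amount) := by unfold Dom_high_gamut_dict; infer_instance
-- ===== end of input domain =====

-- B replaces A's gamut->pairs bucket dict and running pair counter by per-level rescans with a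
-- "strictly-higher-gamut count < approx_amount" test (objective: alternative decomposition, no speed claim).

-- ===== PORT A =====
-- _gamut: keep falsy (zero) values out, then max - min if anything nonzero remains
def pvGamut (value_list : List Int) : Int :=
  let n_list := value_list.filter (fun i => decide (i ≠ 0))
  if n_list.any (fun i => decide (i ≠ 0)) then
    match PySem.List.max? n_list (fun x => x), PySem.List.min? n_list (fun x => x) with
    | some mx, some mn => mx - mn
    | _, _ => 0
  else 0

-- cmb_kerning.get(pair): first-match association lookup. Python returns None on a missing key;
-- that case is unreachable in A (every looked-up pair is a key of cmb_kerning), so [] here is exact.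
def pvLookup (cmb_kerning : List (String × String × List Int)) (p : String × String) : List Int :=
  match cmb_kerning.find? (fun e => (e.1, e.2.1) == p) with
  | some e => e.2.2
  | none => []

def high_gamut_dict (cmb_kerning : List (String × String × List Int)) (approx_amount : Int) : List (String × String × List Int) :=
  -- gamut_dict.setdefault(gamut, []).append(pair)  ==  d[g] = d.get(g, []) + [pair]  ==  Dict.modify
  let gamut_dict : PySem.Dict Int (List (String × String)) :=
    cmb_kerning.foldl
      (fun d e => d.modify (pvGamut e.2.2) [] (fun cur => cur ++ [(e.1, e.2.1)]))
      PySem.Dict.empty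
  let max_gamut_list := PySem.List.sorted gamut_dict.keys (fun x => x) true
  let z := max_gamut_list.foldl
    (fun acc gamut_value =>
      let pairs := gamut_dict.getD gamut_value []   -- gamut_dict.get(gamut_value): key always present
      (if acc.2 < approx_amount then
          pairs.foldl (fun output p => output.insert p (pvLookup cmb_kerning p)) acc.1
        else acc.1,
       acc.2 + (pairs.length : Int)))
    ((PySem.Dict.empty : PySem.Dict (String × String) (List Int)), (0 : Int))
  z.1.items.map (fun kv => (kv.1.1, kv.1.2, kv.2))

-- ===== PORT B =====
def high_gamut_dict_alt (cmb_kerning : List (String × String × List Int)) (approx_amount : Int) : List (String × String × List Int) :=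
  let entries := cmb_kerning.map (fun e => ((e.1, e.2.1), e.2.2, pvGamut e.2.2))
  let gamut_levels := PySem.List.sorted (PySem.Set.ofList (entries.map (fun t => t.2.2))) (fun x => x) true
  let out := gamut_levels.foldl
    (fun out level =>
      -- emit this gamut level iff fewer than approx_amount pairs have a higher gamut
      if entries.foldl (fun n t => if t.2.2 > level then n + 1 else n) (0 : Int) < approx_amount then
        entries.foldl (fun o t => if t.2.2 == level then o.insert t.1 t.2.1 else o) out
      else out)
    (PySem.Dict.empty : PySem.Dict (String × String) (List Int))
  out.items.map (fun kv => (kv.1.1, kv.1.2, kv.2))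

-- ===== PRECONDITION & SPEC =====
-- Pre_ excludes association lists with duplicate (left, right) pair keys: they do not represent a
-- Python dict (A's argument type), so any behaviour of the ports there is accidental.
def Pre_high_gamut_dict (cmb_kerning : List (String × String × List Int)) (approx_amount : Int) : Prop :=
  (cmb_kerning.map (fun e => (e.1, e.2.1))).Nodup

instance (cmb_kerning : List (String × String × List Int)) (approx_amount : Int) : Decidable (Pre_high_gamut_dict cmb_kerning approx_amount) := by unfold Pre_high_gamut_dict; infer_instance

def pvWitness_high_gamut_dict : (List (String × String × List Int)) × Int :=
  ([("A", "V", [-10, 20]), ("T", "o", [0, 5]), ("o", "x", [])], 100)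

def Spec_high_gamut_dict (cmb_kerning : List (String × String × List Int)) (approx_amount : Int) (out : List (String × String × List Int)) : Prop := out = high_gamut_dict_alt cmb_kerning approx_amount
instance (cmb_kerning : List (String × String × List Int)) (approx_amount : Int) (out : List (String × String × List Int)) : Decidable (Spec_high_gamut_dict cmb_kerning approx_amount out) := by unfold Spec_high_gamut_dict; infer_instance

-- ===== CLAIM (what is proved, stated in full; the proofs are below) =====
def Claim_equal_high_gamut_dict : Prop := ∀ (cmb_kerning : List (String × String × List Int)) (approx_amount : Int), Dom_high_gamut_dict cmb_kerning approx_amount → Pre_high_gamut_dict cmb_kerning approx_amount → Spec_high_gamut_dict cmb_kerning approx_amount (high_gamut_dict cmb_kerning approx_amount)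

-- ===== LEMMAS AND PROOFS =====

-- common skeleton both ports are reduced to
def pvBuck (L : List (String × String × List Int)) (lv : Int) : List (String × String × List Int) :=
  L.filter (fun e => pvGamut e.2.2 == lv)

def pvInner (L : List (String × String × List Int)) (lv : Int)
    (out : PySem.Dict (String × String) (List Int)) : PySem.Dict (String × String) (List Int) :=
  (pvBuck L lv).foldl (fun o e => o.insert (e.1, e.2.1) e.2.2) out

def pvLevels (L : List (String × String × List Int)) : List Int :=
  PySem.List.sorted (PySem.Set.ofList (L.map (fun e => pvGamut e.2.2))) (fun x => x) true

def pvStepA (L : List (String × String × List Int)) (a : Int)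
    (acc : PySem.Dict (String × String) (List Int) × Int) (lv : Int) :
    PySem.Dict (String × String) (List Int) × Int :=
  (if acc.2 < a then pvInner L lv acc.1 else acc.1, acc.2 + ((pvBuck L lv).length : Int))

def pvStepB (L : List (String × String × List Int)) (a : Int)
    (out : PySem.Dict (String × String) (List Int)) (lv : Int) :
    PySem.Dict (String × String) (List Int) :=
  if ((L.countP (fun e => decide (pvGamut e.2.2 > lv)) : Int)) < a then pvInner L lv out else out

lemma pvLookup_key (L : List (String × String × List Int))
    (h : (L.map (fun e => (e.1, e.2.1))).Nodup) (e : String × String × List Int) (he : e ∈ L) :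
    pvLookup L (e.1, e.2.1) = e.2.2 := by
  induction L with
  | nil => cases he
  | cons f t ih =>
    simp only [List.map_cons, List.nodup_cons] at h
    rcases List.mem_cons.mp he with rfl | het
    · simp [pvLookup]
    · have hne : ((f.1, f.2.1) == (e.1, e.2.1)) = false := by
        simp only [beq_eq_false_iff_ne, ne_eq]
        intro hkey
        exact h.1 (hkey ▸ List.mem_map_of_mem het)
      simpa [pvLookup, List.find?, hne] using ih h.2 het

lemma gd_getD (L : List (String × String × List Int)) (gv : Int) :
    (L.foldl (fun d e => d.modify (pvGamut e.2.2) [] (fun cur => cur ++ [(e.1, e.2.1)]))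
      PySem.Dict.empty).getD gv []
      = (pvBuck L gv).map (fun e => (e.1, e.2.1)) := by
  rw [show (L.foldl (fun d e => d.modify (pvGamut e.2.2) [] (fun cur => cur ++ [(e.1, e.2.1)]))
        (PySem.Dict.empty : PySem.Dict Int (List (String × String))))
      = ((L.map (fun e => (pvGamut e.2.2, (e.1, e.2.1)))).foldl
          (fun d p => d.modify p.1 [] (fun x => x ++ [p.2])) PySem.Dict.empty)
      from (List.foldl_map (f := fun (e : String × String × List Int) => (pvGamut e.2.2, (e.1, e.2.1)))
          (g := fun (d : PySem.Dict Int (List (String × String))) p => d.modify p.1 [] (fun x => x ++ [p.2]))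
          (l := L) (init := PySem.Dict.empty)).symm]
  rw [PySem.Dict.getD_foldl_modify_append]
  simp [pvBuck, List.filter_map, Function.comp_def]

lemma gd_keys (L : List (String × String × List Int)) :
    (L.foldl (fun d e => d.modify (pvGamut e.2.2) [] (fun cur => cur ++ [(e.1, e.2.1)]))
      PySem.Dict.empty).keys
      = PySem.Set.ofList (L.map (fun e => pvGamut e.2.2)) := by
  rw [PySem.Dict.keys_foldl_modify_key L (fun e => pvGamut e.2.2) []
      (fun _ e => fun cur => cur ++ [(e.1, e.2.1)]) PySem.Dict.empty]
  simp only [PySem.Dict.keys, PySem.Dict.empty]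
  exact PySem.Set.update_empty _

lemma innerA_eq (L : List (String × String × List Int))
    (h : (L.map (fun e => (e.1, e.2.1))).Nodup) (lv : Int)
    (out : PySem.Dict (String × String) (List Int)) :
    ((pvBuck L lv).map (fun e => (e.1, e.2.1))).foldl
      (fun o p => o.insert p (pvLookup L p)) out = pvInner L lv out := by
  rw [List.foldl_map]
  exact PySem.List.foldl_congr_mem _ _ _ _
    (fun acc e he => by rw [pvLookup_key L h e (List.mem_of_mem_filter he)])

lemma portA_eq (L : List (String × String × List Int)) (a : Int)
    (h : (L.map (fun e => (e.1, e.2.1))).Nodup) :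
    high_gamut_dict L a
      = (((pvLevels L).foldl (pvStepA L a)
          ((PySem.Dict.empty : PySem.Dict (String × String) (List Int)), (0 : Int))).1).items.map
          (fun kv => (kv.1.1, kv.1.2, kv.2)) := by
  simp only [high_gamut_dict, gd_keys]
  have hstep : (fun (acc : PySem.Dict (String × String) (List Int) × Int) gamut_value =>
      (if acc.2 < a then
          ((L.foldl (fun d e => d.modify (pvGamut e.2.2) [] (fun cur => cur ++ [(e.1, e.2.1)]))
            PySem.Dict.empty).getD gamut_value []).foldl
            (fun output p => output.insert p (pvLookup L p)) acc.1
        else acc.1,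
       acc.2 + (((L.foldl (fun d e => d.modify (pvGamut e.2.2) [] (fun cur => cur ++ [(e.1, e.2.1)]))
            PySem.Dict.empty).getD gamut_value []).length : Int))) = pvStepA L a := by
    funext acc gv
    rw [pvStepA, gd_getD, innerA_eq L h, List.length_map]
  rw [pvLevels, hstep]

lemma portB_eq (L : List (String × String × List Int)) (a : Int) :
    high_gamut_dict_alt L a
      = ((pvLevels L).foldl (pvStepB L a)
          (PySem.Dict.empty : PySem.Dict (String × String) (List Int))).items.map
          (fun kv => (kv.1.1, kv.1.2, kv.2)) := by
  simp only [high_gamut_dict_alt, pvLevels, List.map_map, Function.comp_def]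
  have hstep : (fun (out : PySem.Dict (String × String) (List Int)) level =>
      if (L.map (fun e => ((e.1, e.2.1), e.2.2, pvGamut e.2.2))).foldl
          (fun n t => if t.2.2 > level then n + 1 else n) (0 : Int) < a then
        (L.map (fun e => ((e.1, e.2.1), e.2.2, pvGamut e.2.2))).foldl
          (fun o t => if t.2.2 == level then o.insert t.1 t.2.1 else o) out
      else out) = pvStepB L a := by
    funext out lv
    rw [pvStepB, List.foldl_map, List.foldl_map,
        PySem.List.foldl_ite_add_one (fun e => pvGamut e.2.2 > lv) L 0,
        PySem.List.foldl_if_eq_foldl_filter (fun e => pvGamut e.2.2 == lv)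
          (fun o (e : String × String × List Int) => o.insert (e.1, e.2.1) e.2.2) L out]
    simp [pvInner, pvBuck]
  rw [hstep]

lemma countP_split {α : Type} (p q r : α → Bool) (l : List α)
    (h : ∀ x ∈ l, p x = (q x || r x) ∧ ¬(q x = true ∧ r x = true)) :
    l.countP p = l.countP q + l.countP r := by
  induction l with
  | nil => simp
  | cons x t ih =>
    have hx := h x (List.mem_cons_self ..)
    have ht := ih (fun y hy => h y (List.mem_cons_of_mem _ hy))
    simp only [List.countP_cons]
    cases hq : q x <;> cases hr : r x <;> simp [hq, hr] at hx ⊢ <;> simp [hx] <;> omega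

lemma emit_loop (L : List (String × String × List Int)) (a : Int) :
    ∀ (levels : List Int) (out : PySem.Dict (String × String) (List Int)) (pc : Int),
      levels.Pairwise (· > ·) →
      (∀ e ∈ L, pvGamut e.2.2 ∈ levels ∨ ∀ lv ∈ levels, pvGamut e.2.2 > lv) →
      pc = (L.countP (fun e => decide (pvGamut e.2.2 ∉ levels)) : Int) →
      (levels.foldl (pvStepA L a) (out, pc)).1 = levels.foldl (pvStepB L a) out := by
  intro levels
  induction levels with
  | nil => intro out pc _ _ _; rfl
  | cons lv rest ih =>
    intro out pc hp hc hpc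
    have hrest : ∀ y ∈ rest, lv > y := (List.pairwise_cons.mp hp).1
    have hp' : rest.Pairwise (· > ·) := (List.pairwise_cons.mp hp).2
    -- pending count at the head level is the strictly-greater count
    have hcount : L.countP (fun e => decide (pvGamut e.2.2 ∉ lv :: rest))
        = L.countP (fun e => decide (pvGamut e.2.2 > lv)) := by
      apply List.countP_congr
      intro e he
      by_cases hgt : pvGamut e.2.2 > lv
      · have : pvGamut e.2.2 ∉ lv :: rest := by
          intro hmem
          rcases List.mem_cons.mp hmem with hh | hh
          · omega
          · have := hrest _ hh; omega
        simp [this, hgt]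
      · have hmem : pvGamut e.2.2 ∈ lv :: rest := by
          rcases hc e he with hmem | hall
          · exact hmem
          · exact absurd (hall lv (List.mem_cons_self ..)) hgt
        simp [hmem, hgt]
    simp only [List.foldl_cons]
    have hout : pvStepB L a out lv
        = (pvStepA L a (out, pc) lv).1 := by
      simp only [pvStepA, pvStepB, hpc, hcount]
    have hpc' : (pvStepA L a (out, pc) lv).2
        = (L.countP (fun e => decide (pvGamut e.2.2 ∉ rest)) : Int) := by
      simp only [pvStepA, hpc]
      have hlen : (pvBuck L lv).length = L.countP (fun e => pvGamut e.2.2 == lv) :=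
        (List.countP_eq_length_filter ..).symm
      have hsplit : L.countP (fun e => decide (pvGamut e.2.2 ∉ rest))
          = L.countP (fun e => decide (pvGamut e.2.2 ∉ lv :: rest))
            + L.countP (fun e => pvGamut e.2.2 == lv) := by
        apply countP_split
        intro e he
        by_cases heq : pvGamut e.2.2 = lv
        · have : lv ∉ rest := fun hmem => by have := hrest _ hmem; omega
          simp [heq, this]
        · constructor
          · by_cases hmem : pvGamut e.2.2 ∈ rest <;> simp [hmem, heq]
          · simp [heq]
      rw [hlen, hsplit]
      push_cast
      ring
    have hc' : ∀ e ∈ L, pvGamut e.2.2 ∈ rest ∨ ∀ lv' ∈ rest, pvGamut e.2.2 > lv' := by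
      intro e he
      rcases hc e he with hmem | hall
      · rcases List.mem_cons.mp hmem with hh | hh
        · exact Or.inr (fun lv' h' => by have := hrest _ h'; omega)
        · exact Or.inl hh
      · exact Or.inr (fun lv' h' => hall lv' (List.mem_cons_of_mem _ h'))
    calc (rest.foldl (pvStepA L a) (pvStepA L a (out, pc) lv)).1
        = (rest.foldl (pvStepA L a) ((pvStepA L a (out, pc) lv).1, (pvStepA L a (out, pc) lv).2)).1 := by rfl
      _ = rest.foldl (pvStepB L a) (pvStepA L a (out, pc) lv).1 := ih _ _ hp' hc' hpc'
      _ = rest.foldl (pvStepB L a) (pvStepB L a out lv) := by rw [hout]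

lemma levels_pairwise_gt (L : List (String × String × List Int)) :
    (pvLevels L).Pairwise (· > ·) := by
  have hge := PySem.List.sorted_pairwise_rev
    (PySem.Set.ofList (L.map (fun e => pvGamut e.2.2))) (fun x => x)
  have hnd : (pvLevels L).Nodup := by
    rw [pvLevels]
    exact ((PySem.List.sorted_perm (PySem.Set.ofList (L.map (fun e => pvGamut e.2.2)))
        (fun x => x) true).nodup_iff).mpr
      (PySem.Set.nodup_ofList _)
  exact (hge.and hnd).imp (fun hab => lt_of_le_of_ne hab.1 (Ne.symm hab.2))

lemma levels_complete (L : List (String × String × List Int)) :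
    ∀ e ∈ L, pvGamut e.2.2 ∈ pvLevels L := by
  intro e he
  rw [pvLevels, PySem.List.mem_sorted, PySem.Set.mem_ofList]
  exact List.mem_map_of_mem he

-- ===== VERDICT (by name: the statement is the Claim_ definition above) =====
theorem high_gamut_dict_spec : Claim_equal_high_gamut_dict := by
  intro L a _ hpre
  unfold Spec_high_gamut_dict
  rw [portA_eq L a hpre, portB_eq L a]
  have h0 : (0 : Int) = (L.countP (fun e => decide (pvGamut e.2.2 ∉ pvLevels L)) : Int) := by
    rw [List.countP_eq_zero.mpr (fun e he => by simp [levels_complete L e he])]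
    rfl
  rw [emit_loop L a (pvLevels L) PySem.Dict.empty 0 (levels_pairwise_gt L)
      (fun e he => Or.inl (levels_complete L e he)) h0]
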